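-- pv_equiv track=rewrite | github.com/minhasahasan06-ctrl/Followup-AI | app/services/red_flag_detection_service.py | _determine_escalation_type
-- ===== SOURCE A (Python) =====
-- from typing import Dict, Any, Optional, List, Tuple
-- from enum import Enum
--
-- class EscalationType(str, Enum):
--     """Types of escalation actions"""
--     EMERGENCY_911 = "emergency_911"
--     IMMEDIATE_DOCTOR = "immediate_doctor"
--     URGENT_APPOINTMENT = "urgent_appointment"
--     ROUTINE_FOLLOWUP = "routine_followup"
--     MONITOR_AND_LOG = "monitor_and_log"
--
-- def _determine_escalation_type(
--
--     symptoms: List[Dict[str, Any]]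
-- ) -> EscalationType:
--     """Determine highest priority escalation type from detected symptoms"""
--     escalation_priority = {
--         EscalationType.EMERGENCY_911.value: 5,
--         EscalationType.IMMEDIATE_DOCTOR.value: 4,
--         EscalationType.URGENT_APPOINTMENT.value: 3,
--         EscalationType.ROUTINE_FOLLOWUP.value: 2,
--         EscalationType.MONITOR_AND_LOG.value: 1
--     }
--
--     max_priority = 0
--     max_escalation = EscalationType.MONITOR_AND_LOG
--
--     for symptom in symptoms:
--         escalation = symptom.get("escalation_type", EscalationType.MONITOR_AND_LOG.value)
--         priority = escalation_priority.get(escalation, 0)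
--         if priority > max_priority:
--             max_priority = priority
--             max_escalation = EscalationType(escalation)
--
--     return max_escalation
-- ===== SOURCE B (Python) =====
-- from typing import Dict, Any, List
-- from enum import Enum
--
-- class EscalationType(str, Enum):
--     """Types of escalation actions"""
--     EMERGENCY_911 = "emergency_911"
--     IMMEDIATE_DOCTOR = "immediate_doctor"
--     URGENT_APPOINTMENT = "urgent_appointment"
--     ROUTINE_FOLLOWUP = "routine_followup"
--     MONITOR_AND_LOG = "monitor_and_log"
--
-- def _determine_escalation_type(
--     symptoms: List[Dict[str, Any]]
-- ) -> EscalationType: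
--     """Determine highest priority escalation type from detected symptoms"""
--     present = {
--         s.get("escalation_type", EscalationType.MONITOR_AND_LOG.value)
--         for s in symptoms
--     }
--     for esc in (EscalationType.EMERGENCY_911,
--                 EscalationType.IMMEDIATE_DOCTOR,
--                 EscalationType.URGENT_APPOINTMENT,
--                 EscalationType.ROUTINE_FOLLOWUP,
--                 EscalationType.MONITOR_AND_LOG):
--         if esc.value in present:
--             return esc
--     return EscalationType.MONITOR_AND_LOG
-- ===== Notes on version B (the rewrite author's own statement) =====
-- stated objective: simpler
-- what changed: Replaces the running (max_priority, max_escalation) accumulator loop with a set of present escalation strings built in one pass plus a fixed priority-ordered scan of the five enum members returning the first one present.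
import Mathlib
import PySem

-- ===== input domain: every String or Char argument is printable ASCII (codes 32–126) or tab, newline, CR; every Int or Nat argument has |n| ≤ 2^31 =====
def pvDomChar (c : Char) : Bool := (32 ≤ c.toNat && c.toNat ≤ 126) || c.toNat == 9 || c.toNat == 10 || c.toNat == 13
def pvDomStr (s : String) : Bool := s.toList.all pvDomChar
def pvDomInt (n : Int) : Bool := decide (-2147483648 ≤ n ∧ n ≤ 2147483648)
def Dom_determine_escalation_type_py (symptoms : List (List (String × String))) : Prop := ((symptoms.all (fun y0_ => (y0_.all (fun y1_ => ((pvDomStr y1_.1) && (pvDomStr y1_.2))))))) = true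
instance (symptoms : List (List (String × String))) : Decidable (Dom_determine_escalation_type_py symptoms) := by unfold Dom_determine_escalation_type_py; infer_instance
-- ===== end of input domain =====

-- B replaces A's running (max_priority, max_escalation) accumulator with a set of the
-- present escalation strings plus a fixed priority-ordered scan; objective: simpler.

-- ===== PORT A =====
-- the escalation_priority dict literal of A
def pvEscPriorityDict : PySem.Dict String Int :=
  PySem.Dict.ofList [("emergency_911", 5), ("immediate_doctor", 4),
    ("urgent_appointment", 3), ("routine_followup", 2), ("monitor_and_log", 1)]

def determine_escalation_type_py (symptoms : List (List (String × String))) : String :=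
  -- max_priority = 0; max_escalation = MONITOR_AND_LOG; for symptom in symptoms: …
  (symptoms.foldl
    (fun st symptom =>
      let escalation := (PySem.Dict.mk symptom).getD "escalation_type" "monitor_and_log"
      let priority := pvEscPriorityDict.getD escalation 0
      if priority > st.1 then (priority, escalation) else st)
    ((0 : Int), "monitor_and_log")).2

-- ===== PORT B =====
def determine_escalation_type_py_alt (symptoms : List (List (String × String))) : String :=
  let present : PySem.Set String :=
    PySem.Set.ofList (symptoms.map
      (fun s => (PySem.Dict.mk s).getD "escalation_type" "monitor_and_log"))
  -- for esc in (EMERGENCY_911, …, MONITOR_AND_LOG): if esc.value in present: return esc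
  if PySem.Set.contains present "emergency_911" then "emergency_911"
  else if PySem.Set.contains present "immediate_doctor" then "immediate_doctor"
  else if PySem.Set.contains present "urgent_appointment" then "urgent_appointment"
  else if PySem.Set.contains present "routine_followup" then "routine_followup"
  else if PySem.Set.contains present "monitor_and_log" then "monitor_and_log"
  else "monitor_and_log"

-- ===== PRECONDITION & SPEC =====
def Spec_determine_escalation_type_py (symptoms : List (List (String × String))) (out : String) : Prop := out = determine_escalation_type_py_alt symptoms
instance (symptoms : List (List (String × String))) (out : String) : Decidable (Spec_determine_escalation_type_py symptoms out) := by unfold Spec_determine_escalation_type_py; infer_instance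

-- ===== CLAIM (what is proved, stated in full; the proofs are below) =====
def Claim_equal_determine_escalation_type_py : Prop := ∀ (symptoms : List (List (String × String))), Dom_determine_escalation_type_py symptoms → Spec_determine_escalation_type_py symptoms (determine_escalation_type_py symptoms)

-- ===== LEMMAS AND PROOFS =====

-- priority of an escalation string (the value escalation_priority.get(e, 0) denotes)
def pvPrio (e : String) : Int :=
  if e = "emergency_911" then 5
  else if e = "immediate_doctor" then 4
  else if e = "urgent_appointment" then 3
  else if e = "routine_followup" then 2
  else if e = "monitor_and_log" then 1
  else 0

-- the escalation string determined by a (reachable) priority value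
def pvStrOf (p : Int) : String :=
  if p = 5 then "emergency_911"
  else if p = 4 then "immediate_doctor"
  else if p = 3 then "urgent_appointment"
  else if p = 2 then "routine_followup"
  else if p = 1 then "monitor_and_log"
  else "monitor_and_log"

theorem pvPrio_eq_dict (e : String) : pvEscPriorityDict.getD e 0 = pvPrio e := by
  simp only [pvEscPriorityDict, PySem.Dict.ofList, PySem.Dict.update, List.foldl,
    PySem.Dict.getD_eq_get?_getD, PySem.Dict.get?_insert, PySem.Dict.get?_empty, pvPrio]
  split_ifs <;> simp_all

theorem pvStrOf_prio (e : String) (h : pvPrio e ≠ 0) : pvStrOf (pvPrio e) = e := by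
  unfold pvPrio at *
  split_ifs at * <;> simp_all <;> rfl

theorem pvPrio_le_five (e : String) : pvPrio e ≤ 5 := by
  unfold pvPrio; split_ifs <;> norm_num

-- A's loop from any state (p, pvStrOf p) computes pvStrOf of the running max priority
theorem pvA_fold {α : Type} (l : List α) (esc : α → String) :
    ∀ p : Int, 0 ≤ p →
    (l.foldl (fun st x => if pvPrio (esc x) > st.1 then (pvPrio (esc x), esc x) else st)
        (p, pvStrOf p)).2
      = pvStrOf (l.foldl (fun a x => max a (pvPrio (esc x))) p) := by
  induction l with
  | nil => intro p _; rfl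
  | cons x t ih =>
    intro p hp
    simp only [List.foldl]
    by_cases h : pvPrio (esc x) > p
    · have hne : pvPrio (esc x) ≠ 0 := by omega
      have hmax : max p (pvPrio (esc x)) = pvPrio (esc x) := by omega
      have hstr := pvStrOf_prio (esc x) hne
      rw [if_pos h, hmax,
        show ((pvPrio (esc x), esc x) : Int × String)
          = (pvPrio (esc x), pvStrOf (pvPrio (esc x))) by rw [hstr]]
      exact ih (pvPrio (esc x)) (by omega)
    · have hmax : max p (pvPrio (esc x)) = p := by omega
      rw [if_neg h, hmax]
      exact ih p hp

theorem pvFoldMax_ge_init (ss : List String) :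
    ∀ a : Int, a ≤ ss.foldl (fun a e => max a (pvPrio e)) a := by
  induction ss with
  | nil => intro a; simp
  | cons e t ih =>
    intro a
    simp only [List.foldl]
    exact le_trans (le_max_left a (pvPrio e)) (ih _)

theorem pvFoldMax_ub (ss : List String) :
    ∀ a : Int, ∀ s ∈ ss, pvPrio s ≤ ss.foldl (fun a e => max a (pvPrio e)) a := by
  induction ss with
  | nil => intro a s hs; cases hs
  | cons e t ih =>
    intro a s hs
    simp only [List.foldl]
    rcases List.mem_cons.mp hs with rfl | h
    · exact le_trans (le_max_right a (pvPrio s)) (pvFoldMax_ge_init t _)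
    · exact ih _ s h

theorem pvFoldMax_le_five (ss : List String) :
    ∀ a : Int, a ≤ 5 → ss.foldl (fun a e => max a (pvPrio e)) a ≤ 5 := by
  induction ss with
  | nil => intro a h; simpa using h
  | cons e t ih =>
    intro a h
    simp only [List.foldl]
    exact ih _ (max_le h (pvPrio_le_five e))

theorem pvFoldMax_wit (ss : List String) :
    ∀ a : Int, ss.foldl (fun a e => max a (pvPrio e)) a ≠ a →
      ∃ s ∈ ss, pvPrio s = ss.foldl (fun a e => max a (pvPrio e)) a := by
  induction ss with
  | nil => intro a h; simp at h
  | cons e t ih =>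
    intro a h
    simp only [List.foldl] at *
    by_cases he : t.foldl (fun a e => max a (pvPrio e)) (max a (pvPrio e)) = max a (pvPrio e)
    · rw [he] at h ⊢
      refine ⟨e, List.mem_cons_self, ?_⟩
      rcases max_choice a (pvPrio e) with hc | hc
      · exact absurd hc h
      · omega
    · obtain ⟨s, hs, hps⟩ := ih (max a (pvPrio e)) he
      exact ⟨s, List.mem_cons_of_mem e hs, hps⟩

theorem pvPrio_eq_cases (s : String) :
    pvPrio s = 5 → s = "emergency_911" := by
  unfold pvPrio; split_ifs <;> simp_all

theorem pvPrio_eq_cases4 (s : String) : pvPrio s = 4 → s = "immediate_doctor" := by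
  unfold pvPrio; split_ifs <;> simp_all
theorem pvPrio_eq_cases3 (s : String) : pvPrio s = 3 → s = "urgent_appointment" := by
  unfold pvPrio; split_ifs <;> simp_all
theorem pvPrio_eq_cases2 (s : String) : pvPrio s = 2 → s = "routine_followup" := by
  unfold pvPrio; split_ifs <;> simp_all
theorem pvPrio_eq_cases1 (s : String) : pvPrio s = 1 → s = "monitor_and_log" := by
  unfold pvPrio; split_ifs <;> simp_all

-- ===== VERDICT (by name: the statement is the Claim_ definition above) =====
theorem determine_escalation_type_py_spec : Claim_equal_determine_escalation_type_py := by
  intro symptoms _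
  unfold Spec_determine_escalation_type_py determine_escalation_type_py determine_escalation_type_py_alt
  set ss := symptoms.map (fun s => (PySem.Dict.mk s).getD "escalation_type" "monitor_and_log") with hss
  -- rewrite A's fold over symptoms as a fold over ss, with priorities via pvPrio
  have hA : (symptoms.foldl
      (fun st symptom =>
        let escalation := (PySem.Dict.mk symptom).getD "escalation_type" "monitor_and_log"
        let priority := pvEscPriorityDict.getD escalation 0
        if priority > st.1 then (priority, escalation) else st)
      ((0 : Int), "monitor_and_log")).2
      = pvStrOf (ss.foldl (fun a e => max a (pvPrio e)) 0) := by
    rw [hss, List.foldl_map]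
    simp only [pvPrio_eq_dict]
    exact pvA_fold symptoms
      (fun s => (PySem.Dict.mk s).getD "escalation_type" "monitor_and_log") 0 le_rfl
  rw [hA]
  set M := ss.foldl (fun a e => max a (pvPrio e)) 0 with hM
  have h0 : 0 ≤ M := pvFoldMax_ge_init ss 0
  have h5 : M ≤ 5 := pvFoldMax_le_five ss 0 (by norm_num)
  have hub : ∀ s ∈ ss, pvPrio s ≤ M := pvFoldMax_ub ss 0
  have hwit : M ≠ 0 → ∃ s ∈ ss, pvPrio s = M := pvFoldMax_wit ss 0
  have hnotmem : ∀ x : String, (0 : Int) < pvPrio x → M < pvPrio x → x ∉ ss := by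
    intro x _ hlt hx
    exact absurd (hub x hx) (by omega)
  interval_cases M
  · -- M = 0: none of the five strings is in ss
    have c1 := hnotmem "emergency_911" (by decide) (by decide)
    have c2 := hnotmem "immediate_doctor" (by decide) (by decide)
    have c3 := hnotmem "urgent_appointment" (by decide) (by decide)
    have c4 := hnotmem "routine_followup" (by decide) (by decide)
    have c5 := hnotmem "monitor_and_log" (by decide) (by decide)
    simp [pvStrOf, c1, c2, c3, c4, c5]
  · obtain ⟨s, hs, hp⟩ := hwit (by norm_num)
    have := pvPrio_eq_cases1 s hp; subst this
    have c1 := hnotmem "emergency_911" (by decide) (by decide)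
    have c2 := hnotmem "immediate_doctor" (by decide) (by decide)
    have c3 := hnotmem "urgent_appointment" (by decide) (by decide)
    have c4 := hnotmem "routine_followup" (by decide) (by decide)
    simp [pvStrOf, c1, c2, c3, c4, hs]
  · obtain ⟨s, hs, hp⟩ := hwit (by norm_num)
    have := pvPrio_eq_cases2 s hp; subst this
    have c1 := hnotmem "emergency_911" (by decide) (by decide)
    have c2 := hnotmem "immediate_doctor" (by decide) (by decide)
    have c3 := hnotmem "urgent_appointment" (by decide) (by decide)
    simp [pvStrOf, c1, c2, c3, hs]
  · obtain ⟨s, hs, hp⟩ := hwit (by norm_num)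
    have := pvPrio_eq_cases3 s hp; subst this
    have c1 := hnotmem "emergency_911" (by decide) (by decide)
    have c2 := hnotmem "immediate_doctor" (by decide) (by decide)
    simp [pvStrOf, c1, c2, hs]
  · obtain ⟨s, hs, hp⟩ := hwit (by norm_num)
    have := pvPrio_eq_cases4 s hp; subst this
    have c1 := hnotmem "emergency_911" (by decide) (by decide)
    simp [pvStrOf, c1, hs]
  · obtain ⟨s, hs, hp⟩ := hwit (by norm_num)
    have := pvPrio_eq_cases s hp; subst this
    simp [pvStrOf, hs]
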